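/-
  THE FIXED BINARIES: **nothing changes for correct callers, at the machine level** — the contract of the fixed jsmn_main implies the ORIGINAL
  contract `MainSpec` for the same `Bin`: where `MainPre` holds (a fresh parser, an array of `num_tokens ≤ 2^31` entries inside the mapped memory)
  the check passes (`Jsmn.parseFixed_eq`: `num_tokens` and `len` are far below INT_MAX — the buffers lie inside n · 2 MB ≤ 1 GB) and `parseFixed`
  IS the original `parseFuel`, for whatever fuel makes that answer. So everything built on `MainSpec b 8` (Prog/Jsmn/Start*.lean: the stub, the start
  machine, the final HLT, `outputs_of_model`) applies to the fixed images as it is.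
-/
import Prog.Jsmn.Fixed.RunSpecs
import Json.Jsmn.Total

namespace X86
namespace J6
open X86.User (CodeAt RegsKept Span FlagsOK Layout toNat_add_ofNat toNat_ofNat_lt' add_ofNat_add)
open Jsmn

set_option linter.unusedVariables false

/-- The model's answer does not depend on the fuel, once there is enough of it. -/
theorem parseFuel_unique {cfg : Jsmn.Config} {js : List UInt8} {p : Parser} {toks : Option Tokens} {n f g : Nat}
    {x y : Int × Parser × Option Tokens} (hx : parseFuel cfg f js p toks n = some x) (hy : parseFuel cfg g js p toks n = some y) : x = y := by
  rcases Nat.le_total f g with h | h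
  · have := parseFuel_mono hx h; rw [this] at hy; exact Option.some.inj hy
  · have := parseFuel_mono hy h; rw [this] at hx; exact (Option.some.inj hx).symm

/-- **The fixed jsmn_main satisfies the original contract.** -/
theorem MainSpecFixed.toMainSpec {b : Bin} {n : User.Layout} (h : MainSpecFixed b n) : MainSpec b n := by
  intro v0 ret jsA out js numTokens ts fuel r p' ts' hp hm hrn
  have hn : n.pages ≤ 512 := hp.call.nle
  have hjs := hp.jsR.hi
  have hout := hp.outR.hi
  have h16 : 16 ≤ b.cfg.tokSize := by unfold Jsmn.Config.tokSize; split <;> omega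
  have hmul : 16 * numTokens ≤ b.cfg.tokSize * numTokens := Nat.mul_le_mul_right _ h16
  have hN : numTokens ≤ 2147483647 := by omega
  have hlen : js.length ≤ 2147483647 := by omega
  have hinv : Inv b.cfg Parser.init (some ts) numTokens :=
    (Jsmn.safeFacts b.cfg).init _ _ ⟨by omega, fun t e => by cases e; exact ⟨hp.tlen, hp.small⟩⟩
  have heq := parseFixed_eq b.cfg js Parser.init (some ts) numTokens hinv hN (by show 0 + js.length ≤ _; omega)
  obtain ⟨res, hres⟩ := parse_total b.cfg js Parser.init (some ts) numTokens (by omega) hinv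
  have hu : res = (r, p', some ts') := parseFuel_unique (by unfold parse at hres; exact hres) hm
  subst hu
  exact h v0 ret jsA out js numTokens ts r p' ts'
    ⟨hp.call, hp.rdi, hp.rsi, hp.rdx, hp.rcx, hp.jslt, by omega, hp.text, hp.tlen, hp.toks, hp.jsR, hp.outR, hp.jsOut⟩ (by rw [heq]; exact hres) hrn

end J6
end X86
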